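-- pv_equiv track=rewrite | github.com/sofeikov/ezrules | ezrules/backend/rule_quality.py | normalize_rule_quality_pairs
-- ===== SOURCE A (Python) =====
-- def normalize_rule_quality_pairs(
--     curated_pairs: list[tuple[str, str]],
-- ) -> list[tuple[str, str]]:
--     unique_pairs = {
--         (outcome.strip(), label.strip())
--         for outcome, label in curated_pairs
--         if outcome and label and outcome.strip() and label.strip()
--     }
--     return sorted(unique_pairs, key=lambda pair: (pair[0], pair[1]))
-- ===== SOURCE B (Python) =====
-- def normalize_rule_quality_pairs(
--     curated_pairs: list[tuple[str, str]],
-- ) -> list[tuple[str, str]]: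
--     pairs = []
--     for outcome, label in curated_pairs:
--         o = outcome.strip()
--         lb = label.strip()
--         if outcome and label and o and lb:
--             pairs.append((o, lb))
--     pairs.sort(key=lambda pair: (pair[0], pair[1]))
--     out = []
--     for p in pairs:
--         if not out or out[-1] != p:
--             out.append(p)
--     return out
-- ===== Notes on version B (the rewrite author's own statement) =====
-- stated objective: alternative
-- what changed: B replaces A's hash-set deduplication before sorting by sorting the normalized pairs with duplicates kept and collapsing equal adjacent pairs in a single pass over the sorted list.
import Mathlib
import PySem

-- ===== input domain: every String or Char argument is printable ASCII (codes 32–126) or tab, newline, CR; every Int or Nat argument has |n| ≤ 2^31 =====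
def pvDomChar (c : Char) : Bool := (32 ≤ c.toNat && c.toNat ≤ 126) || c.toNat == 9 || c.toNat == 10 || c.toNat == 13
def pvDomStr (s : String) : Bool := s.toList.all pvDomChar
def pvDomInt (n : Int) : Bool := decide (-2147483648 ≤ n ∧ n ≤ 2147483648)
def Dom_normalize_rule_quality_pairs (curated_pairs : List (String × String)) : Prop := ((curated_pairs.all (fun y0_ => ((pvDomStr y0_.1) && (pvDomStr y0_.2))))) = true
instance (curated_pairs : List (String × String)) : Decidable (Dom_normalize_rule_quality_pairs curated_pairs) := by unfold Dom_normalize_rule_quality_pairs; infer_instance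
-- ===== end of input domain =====

-- B replaces A's hash-set dedup + sort by sort-then-adjacent-collapse in one pass (alternative decomposition, same result).

-- ===== PORT A =====
-- set comprehension = PySem.Set.ofList of the filtered/mapped list; sorted(key=(p[0],p[1])) = sorted2
def normalize_rule_quality_pairs (curated_pairs : List (String × String)) : List (String × String) :=
  let unique_pairs : PySem.Set (String × String) :=
    PySem.Set.ofList
      ((curated_pairs.filter (fun p =>
          !(p.1 == "") && !(p.2 == "") && !(PySem.Str.strip p.1 == "") && !(PySem.Str.strip p.2 == ""))).map
        (fun p => (PySem.Str.strip p.1, PySem.Str.strip p.2)))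
  PySem.List.sorted2 unique_pairs Prod.fst Prod.snd

-- ===== PORT B =====
-- explicit loop appending each normalized pair that passes the filter (duplicates kept), in-place
-- sort with the same key, then one pass appending each pair only when it differs from the last
-- appended one (out[-1] on a nonempty out = getLast?)
def normalize_rule_quality_pairs_alt (curated_pairs : List (String × String)) : List (String × String) :=
  let pairs : List (String × String) :=
    curated_pairs.foldl (fun acc p =>
      let o := PySem.Str.strip p.1
      let lb := PySem.Str.strip p.2
      if !(p.1 == "") && !(p.2 == "") && !(o == "") && !(lb == "") then acc ++ [(o, lb)] else acc) []
  let pairs_sorted := PySem.List.sorted2 pairs Prod.fst Prod.snd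
  pairs_sorted.foldl (fun out p =>
    match out.getLast? with
    | none => out ++ [p]
    | some a => if a == p then out else out ++ [p]) []

-- ===== PRECONDITION & SPEC =====
def Spec_normalize_rule_quality_pairs (curated_pairs : List (String × String)) (out : List (String × String)) : Prop := out = normalize_rule_quality_pairs_alt curated_pairs
instance (curated_pairs : List (String × String)) (out : List (String × String)) : Decidable (Spec_normalize_rule_quality_pairs curated_pairs out) := by unfold Spec_normalize_rule_quality_pairs; infer_instance

-- ===== CLAIM (what is proved, stated in full; the proofs are below) =====
def Claim_equal_normalize_rule_quality_pairs : Prop := ∀ (curated_pairs : List (String × String)), Dom_normalize_rule_quality_pairs curated_pairs → Spec_normalize_rule_quality_pairs curated_pairs (normalize_rule_quality_pairs curated_pairs)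

-- ===== LEMMAS AND PROOFS =====

-- Python's tuple key (p[0], p[1]) orders pairs lexicographically: the key as a map into the Lex order
def pvKey (p : String × String) : String ×ₗ String := toLex p

theorem pvKey_injective : Function.Injective pvKey := fun _ _ h => h

theorem pvBefore_eq :
    (fun a b : String × String => decide (a.1 < b.1) || (!decide (b.1 < a.1) && decide (a.2 < b.2)))
      = fun a b => decide (pvKey a < pvKey b) := by
  funext a b
  rcases lt_trichotomy a.1 b.1 with h | h | h
  · simp [pvKey, Prod.Lex.lt_iff, h, asymm h]
  · simp [pvKey, Prod.Lex.lt_iff, h]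
  · simp [pvKey, Prod.Lex.lt_iff, h, asymm h, ne_of_gt h]

theorem pvSorted2_eq_sorted_key (xs : List (String × String)) :
    PySem.List.sorted2 xs Prod.fst Prod.snd = PySem.List.sorted xs pvKey := by
  show xs.foldl (fun acc x => PySem.List.insertBy _ x acc) [] =
       xs.foldl (fun acc x => PySem.List.insertBy _ x acc) []
  rw [pvBefore_eq]

-- adjacent collapse as structural recursion (proof-side reformulation of B's fold)
def pvDD (prev : String × String) : List (String × String) → List (String × String)
  | [] => []
  | y :: ys => if y = prev then pvDD prev ys else y :: pvDD y ys

theorem pvFoldl_step (l : List (String × String)) (acc : List (String × String)) (a : String × String) :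
    l.foldl (fun out p =>
      match out.getLast? with
      | none => out ++ [p]
      | some a => if a == p then out else out ++ [p]) (acc ++ [a])
      = acc ++ a :: pvDD a l := by
  induction l generalizing acc a with
  | nil => simp [pvDD]
  | cons y ys ih =>
    simp only [List.foldl_cons, List.getLast?_append, List.getLast?_singleton, Option.some_or]
    by_cases h : a = y
    · rw [if_pos (show (a == y) = true by simp [h])]
      rw [ih acc a]
      subst h
      simp [pvDD]
    · have h' : ¬ y = a := fun e => h e.symm
      rw [if_neg (show ¬ ((a == y) = true) by simp [h])]
      rw [show acc ++ [a] ++ [y] = (acc ++ [a]) ++ [y] from rfl, ih (acc ++ [a]) y]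
      simp [pvDD, h']

theorem pvMem_cons_dd (prev : String × String) (xs : List (String × String)) (x : String × String) :
    x ∈ prev :: pvDD prev xs ↔ x ∈ prev :: xs := by
  induction xs generalizing prev with
  | nil => rfl
  | cons y ys ih =>
    by_cases h : y = prev
    · subst h
      simp only [pvDD, reduceIte]
      have := ih y
      simp only [List.mem_cons] at this ⊢
      tauto
    · simp only [pvDD, if_neg h]
      have := ih y
      simp only [List.mem_cons] at this ⊢
      tauto

theorem pvPairwise_dd (prev : String × String) (xs : List (String × String))
    (h : (prev :: xs).Pairwise (fun a b => pvKey a ≤ pvKey b)) :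
    (prev :: pvDD prev xs).Pairwise (fun a b => pvKey a < pvKey b) := by
  induction xs generalizing prev with
  | nil => simp [pvDD]
  | cons y ys ih =>
    rcases List.pairwise_cons.1 h with ⟨hhead, htail⟩
    by_cases hyp : y = prev
    · rw [show pvDD prev (y :: ys) = pvDD prev ys by simp [pvDD, hyp]]
      apply ih
      refine List.pairwise_cons.2 ⟨?_, (List.pairwise_cons.1 htail).2⟩
      intro z hz
      exact hhead z (List.mem_cons_of_mem _ hz)
    · rw [show pvDD prev (y :: ys) = y :: pvDD y ys by simp [pvDD, hyp]]
      have hlt : pvKey prev < pvKey y :=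
        lt_of_le_of_ne (hhead y (List.mem_cons_self ..))
          (fun e => hyp ((pvKey_injective e).symm))
      have hrest : (y :: pvDD y ys).Pairwise (fun a b => pvKey a < pvKey b) := ih y htail
      have hy' : ∀ z ∈ pvDD y ys, pvKey y < pvKey z := (List.pairwise_cons.1 hrest).1
      refine List.pairwise_cons.2 ⟨?_, hrest⟩
      intro z hz
      rcases List.mem_cons.1 hz with rfl | hz'
      · exact hlt
      · exact lt_trans hlt (hy' z hz')

theorem pvNodup_of_pairwise_lt (l : List (String × String))
    (h : l.Pairwise (fun a b => pvKey a < pvKey b)) : l.Nodup :=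
  h.imp (fun hlt => fun e => absurd (e ▸ hlt) (lt_irrefl _))

-- core: sorted-set = adjacent collapse of the sorted multiset
theorem pvMain (ys : List (String × String)) :
    PySem.List.sorted (PySem.Set.ofList ys) pvKey =
      (PySem.List.sorted ys pvKey).foldl (fun out p =>
        match out.getLast? with
        | none => out ++ [p]
        | some a => if a == p then out else out ++ [p]) [] := by
  rcases hs : PySem.List.sorted ys pvKey with _ | ⟨x, t⟩
  · have hnil : ys = [] :=
      (PySem.List.sorted_eq_nil_iff (xs := ys) (key := pvKey) (rev := false)).1 hs
    subst hnil
    rfl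
  · have hpw : (x :: t).Pairwise (fun a b => pvKey a ≤ pvKey b) := by
      rw [← hs]; exact PySem.List.sorted_pairwise ys pvKey
    have hrhs : (x :: t).foldl (fun out p =>
        match out.getLast? with
        | none => out ++ [p]
        | some a => if a == p then out else out ++ [p]) ([] : List (String × String))
        = x :: pvDD x t := by
      simp only [List.foldl_cons, List.getLast?_nil, List.nil_append]
      exact pvFoldl_step t [] x
    rw [hrhs]
    apply PySem.List.sorted_eq_of_perm_of_pairwise_lt
    · have hnd1 : (x :: pvDD x t).Nodup :=
        pvNodup_of_pairwise_lt _ (pvPairwise_dd x t hpw)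
      refine (List.perm_ext_iff_of_nodup hnd1 (PySem.Set.nodup_ofList ys)).2 ?_
      intro a
      rw [pvMem_cons_dd, PySem.Set.mem_ofList, ← hs, PySem.List.mem_sorted]
    · exact pvPairwise_dd x t hpw

-- ===== VERDICT (by name: the statement is the Claim_ definition above) =====
theorem normalize_rule_quality_pairs_spec : Claim_equal_normalize_rule_quality_pairs := by
  intro curated_pairs _
  unfold Spec_normalize_rule_quality_pairs
  unfold normalize_rule_quality_pairs normalize_rule_quality_pairs_alt
  simp only [PySem.List.foldl_append_if, List.nil_append, pvSorted2_eq_sorted_key]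
  exact pvMain _
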